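-- pv_equiv track=rewrite | github.com/thegreatDinosaur/varaint-caller | grouping.py | split_up
-- ===== SOURCE A (Python) =====
-- def split_up(s: str):
--     delims = "'\"`"
--     find_ws = lambda ch: ch.isspace()
--     s = s.strip()
--
--     output = []
--     embedded_quote = False
--     key_char = ' '
--
--     while s:
--         if s[0] in delims:
--             key_char = s[0]
--             end = s.find(key_char, 1)
--             while end != -1 and s[end - 1] == '\\':  # Handle escaped quotes
--                 end = s.find(key_char, end + 1)
--                 embedded_quote = True
--
--             if end != -1:
--                 output.append(s[1:end])
--                 s = s[end + 1:]
--             else: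
--                 output.append(s[1:])
--                 s = ""
--         else:
--             it = next((i for i, ch in enumerate(s) if find_ws(ch)), len(s))
--             output.append(s[:it])
--             s = s[it:]
--
--         # Transform any embedded quotes into the regular character
--         if embedded_quote:
--             output[-1] = output[-1].replace(f"\\{key_char}", key_char)
--             embedded_quote = False
--
--         s = s.strip()
--
--     return output
-- ===== SOURCE B (Python) =====
-- def split_up(s: str):
--     delims = "'\"`"
--     s = s.strip()
--     out = []
--     i, n = 0, len(s)
--     while True:
--         while i < n and s[i].isspace():
--             i += 1
--         if i >= n:
--             return out
--         c = s[i]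
--         if c in delims:
--             i += 1
--             buf = []
--             esc = False
--             prev = c
--             while i < n:
--                 ch = s[i]
--                 i += 1
--                 if ch == c and prev != '\\':
--                     break
--                 if ch == c:
--                     esc = True
--                 buf.append(ch)
--                 prev = ch
--             tok = ''.join(buf)
--             if esc:
--                 tok = tok.replace('\\' + c, c)
--             out.append(tok)
--         else:
--             j = i
--             while j < n and not s[j].isspace():
--                 j += 1
--             out.append(s[i:j])
--             i = j
-- ===== Notes on version B (the rewrite author's own statement) =====
-- stated objective: alternative
-- what changed: A repeatedly slices, re-strips and re-scans the remaining string (s.find, s[...:...], s.strip() per token); B makes a single left-to-right pass with an integer cursor, building each token as it goes, so the string is never copied or rescanned (measured ~1.3x faster, below the 1.5x bar, so no speed claim).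
import Mathlib
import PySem

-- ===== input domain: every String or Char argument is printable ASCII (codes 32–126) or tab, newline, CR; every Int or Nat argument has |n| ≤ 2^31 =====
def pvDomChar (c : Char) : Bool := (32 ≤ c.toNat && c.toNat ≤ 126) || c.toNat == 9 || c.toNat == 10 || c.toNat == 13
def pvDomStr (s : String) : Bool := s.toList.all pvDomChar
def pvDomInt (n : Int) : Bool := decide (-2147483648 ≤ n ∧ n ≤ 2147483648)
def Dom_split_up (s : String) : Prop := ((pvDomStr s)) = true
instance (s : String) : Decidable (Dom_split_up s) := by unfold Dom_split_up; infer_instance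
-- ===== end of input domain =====

-- B replaces A's per-token find/slice/strip of the remaining string by one left-to-right
-- cursor pass over the characters; objective: alternative (single-pass) implementation.

-- ===== PORT A =====
-- Python A's inner `while end != -1 and s[end-1] == '\\': end = s.find(key_char, end+1); embedded_quote = True`
-- (fuel is only a totality guard: `end` strictly grows each round, so `s.length + 1` rounds always suffice)
def pvAScan (fuel : Nat) (s : List Char) (key : Char) (e : Int) (emb : Bool) : Int × Bool :=
  match fuel with
  | 0 => (e, emb)
  | fuel + 1 =>
    if e ≠ -1 ∧ PySem.List.pyGet? s (e - 1) = some '\\' then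
      pvAScan fuel s key (PySem.Chars.findFrom s [key] (e + 1) none) true
    else (e, emb)

-- Python A's outer `while s:` loop; state = (current string, key_char, output); embedded_quote is
-- always False when the loop's condition is tested, so it is not loop state.  The `s = s.strip()`
-- executed before the loop and at the body's end is performed here at the head of each round.
-- (fuel is only a totality guard: each round consumes at least one character)
def pvALoop (fuel : Nat) (s0 : List Char) (kc : Char) (out : List (List Char)) : List (List Char) :=
  match fuel with
  | 0 => out
  | fuel + 1 =>
    let s := PySem.Chars.strip s0
    match s with
    | [] => out
    | ch :: _ =>
      if ch ∈ ['\'', '"', '`'] then                     -- if s[0] in delims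
        let key := ch
        let p := pvAScan (s.length + 1) s key (PySem.Chars.findFrom s [key] 1 none) false
        let e := p.1
        let emb := p.2
        if e ≠ -1 then
          let tok := PySem.List.slice s (some 1) (some e)          -- s[1:end]
          let s' := PySem.List.slice s (some (e + 1)) none         -- s[end+1:]
          let out' := out ++ [tok]
          let out'' := if emb then out'.dropLast ++ [PySem.Chars.replace tok ['\\', key] [key]] else out'
          pvALoop fuel s' key out''
        else
          let tok := PySem.List.slice s (some 1) none              -- s[1:]
          let out' := out ++ [tok]
          let out'' := if emb then out'.dropLast ++ [PySem.Chars.replace tok ['\\', key] [key]] else out'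
          pvALoop fuel [] key out''
      else
        let it := s.findIdx PySem.Chars.isspace       -- next((i for i,ch in enumerate(s) if ch.isspace()), len(s))
        let tok := PySem.List.slice s none (some (it : Int))       -- s[:it]
        let s' := PySem.List.slice s (some (it : Int)) none        -- s[it:]
        pvALoop fuel s' kc (out ++ [tok])

def split_up (s : String) : List String :=
  (pvALoop (s.toList.length + 1) s.toList ' ' []).map String.ofList

-- ===== PORT B =====
-- B's quoted-token scanner: walks the characters once; stops at the first unescaped `key`,
-- returns (token chars, remaining chars, whether an escaped `key` was consumed).
def pvBScan (key : Char) (prev : Char) : List Char → List Char × List Char × Bool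
  | [] => ([], [], false)
  | x :: xs =>
    if x = key ∧ prev ≠ '\\' then ([], xs, false)
    else
      let r := pvBScan key x xs
      (x :: r.1, r.2.1, r.2.2 || decide (x = key))

-- B's cursor loop: skip whitespace, read one token, recurse on the rest.
-- (fuel is only a totality guard: each round consumes at least one character)
def pvBLoop (fuel : Nat) (s0 : List Char) : List (List Char) :=
  match fuel with
  | 0 => []
  | fuel + 1 =>
    let s := s0.dropWhile PySem.Chars.isspace
    match s with
    | [] => []
    | c :: rest =>
      if c ∈ ['\'', '"', '`'] then
        let r := pvBScan c c rest
        let tok := if r.2.2 then PySem.Chars.replace r.1 ['\\', c] [c] else r.1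
        tok :: pvBLoop fuel r.2.1
      else
        let tok := s.takeWhile (fun ch => !PySem.Chars.isspace ch)
        tok :: pvBLoop fuel (s.dropWhile (fun ch => !PySem.Chars.isspace ch))

def split_up_alt (s : String) : List String :=
  (pvBLoop (s.toList.length + 1) (PySem.Chars.strip s.toList)).map String.ofList

-- ===== PRECONDITION & SPEC =====
def Spec_split_up (s : String) (out : List String) : Prop := out = split_up_alt s
instance (s : String) (out : List String) : Decidable (Spec_split_up s out) := by unfold Spec_split_up; infer_instance

-- ===== CLAIM (what is proved, stated in full; the proofs are below) =====
def Claim_equal_split_up : Prop := ∀ (s : String), Dom_split_up s → Spec_split_up s (split_up s)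

-- ===== LEMMAS AND PROOFS =====

-- `no trailing whitespace` / `no leading whitespace`
def pvNoTrail (s : List Char) : Prop := ∀ c, s.getLast? = some c → PySem.Chars.isspace c = false
def pvNoLead (s : List Char) : Prop := ∀ c, s.head? = some c → PySem.Chars.isspace c = false

-- the position at which the quoted-token scan stops: first x = key whose predecessor is not '\'
def pvFS (key : Char) (prev : Char) : List Char → Option Nat
  | [] => none
  | x :: xs =>
    if x = key ∧ prev ≠ '\\' then some 0
    else (pvFS key x xs).map (· + 1)

lemma pvFS_eq_none {key : Char} (prev : Char) {l : List Char} (h : key ∉ l) :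
    pvFS key prev l = none := by
  induction l generalizing prev with
  | nil => rfl
  | cons x xs ih =>
    simp only [List.mem_cons, not_or] at h
    have hx : ¬ (x = key ∧ prev ≠ '\\') := fun hc => h.1 hc.1.symm
    simp [pvFS, if_neg hx, ih x h.2]

lemma pvFS_append {key : Char} (prev : Char) {pre : List Char} (l : List Char)
    (h : key ∉ pre) :
    pvFS key prev (pre ++ l) = (pvFS key (pre.getLastD prev) l).map (· + pre.length) := by
  induction pre generalizing prev with
  | nil => cases pvFS key prev l <;> simp
  | cons x xs ih =>
    simp only [List.mem_cons, not_or] at h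
    have hx : ¬ (x = key ∧ prev ≠ '\\') := fun hc => h.1 hc.1.symm
    simp only [List.cons_append, pvFS, if_neg hx, ih x h.2, List.getLastD_cons, List.length_cons]
    cases pvFS key (xs.getLastD x) l with
    | none => simp
    | some v => simp; omega

lemma pvBScan_spec (key : Char) : ∀ (l : List Char) (prev : Char),
    pvBScan key prev l =
      match pvFS key prev l with
      | some j => (l.take j, l.drop (j + 1), decide (key ∈ l.take j))
      | none => (l, [], decide (key ∈ l)) := by
  intro l
  induction l with
  | nil => intro prev; rfl
  | cons x xs ih =>
    intro prev
    by_cases hx : x = key ∧ prev ≠ '\\'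
    · simp [pvBScan, pvFS, hx]
    · simp only [pvBScan, pvFS, if_neg hx, ih x]
      rcases h : pvFS key x xs with _ | j
      · simp [Bool.or_comm, eq_comm (a := key)]
      · simp [Bool.or_comm, eq_comm (a := key)]

lemma pv_singleton_prefix {c : Char} {l : List Char} : [c] <+: l ↔ l.head? = some c := by
  cases l <;> simp [eq_comm]

lemma pvAScan_spec (key : Char) :
    ∀ (fuel : Nat) (s : List Char) (k : Nat) (emb : Bool),
    1 ≤ k → k ≤ s.length → s.length - k < fuel →
    pvAScan fuel s key (PySem.Chars.findFrom s [key] (k : Int) none) emb =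
      (match pvFS key (s.getD (k - 1) ' ') (s.drop k) with
       | some j => (((k + j : Nat) : Int), emb || decide (key ∈ (s.drop k).take j))
       | none => (-1, emb || decide (key ∈ s.drop k))) := by
  intro fuel
  induction fuel with
  | zero => intro s k emb h1 h2 hf; omega
  | succ f ih =>
    intro s k emb h1 h2 hf
    by_cases hmem : key ∈ s.drop k
    · -- there is a further occurrence of `key`
      have hne : PySem.Chars.findFrom s [key] (k : Int) none ≠ -1 := by
        rw [ne_eq, PySem.Chars.findFrom_natCast_eq_neg_one_iff s [key] k h2]
        simp [List.singleton_infix_iff, hmem]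
      obtain ⟨hge, hpre, hmin⟩ := PySem.Chars.findFrom_natCast_spec s [key] k h2 hne
      set r := PySem.Chars.findFrom s [key] (k : Int) none with hrdef
      have hr0 : (0 : Int) ≤ r := le_trans (by exact_mod_cast Nat.zero_le k) hge
      set m := r.toNat with hmdef
      have hrm : r = (m : Int) := by omega
      have hkm : k ≤ m := by omega
      rw [pv_singleton_prefix, List.head?_drop] at hpre
      obtain ⟨hmlt, hsmval⟩ := List.getElem?_eq_some_iff.mp hpre
      have hbetween : ∀ i, k ≤ i → i < m → s[i]? ≠ some key := by
        intro i hik him hcontra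
        exact hmin i hik him (by rw [pv_singleton_prefix, List.head?_drop]; exact hcontra)
      have hdlen : (s.drop k).length = s.length - k := List.length_drop
      have hjlt : m - k < (s.drop k).length := by omega
      have hdj : (s.drop k)[m - k]'hjlt = key := by
        rw [List.getElem_drop]
        have : k + (m - k) = m := by omega
        simp [this, hsmval]
      have hd_decomp : s.drop k =
          (s.drop k).take (m - k) ++ key :: (s.drop k).drop (m - k + 1) := by
        conv_lhs => rw [← List.take_append_drop (m - k) (s.drop k)]
        rw [List.drop_eq_getElem_cons hjlt, hdj]
      have hnotin : key ∉ (s.drop k).take (m - k) := by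
        intro hmem'
        obtain ⟨i, hi, hival⟩ := List.mem_iff_getElem.mp hmem'
        rw [List.getElem_take] at hival
        have hilt : i < m - k := by simpa using lt_of_lt_of_le hi (by simp)
        have : s[k + i]? = some key := by
          rw [List.getElem_drop] at hival
          rw [List.getElem?_eq_getElem (by omega)]
          simp only [hival]
        exact hbetween (k + i) (by omega) (by omega) this
      have hlentake : ((s.drop k).take (m - k)).length = m - k := by
        simp [List.length_take]; omega
      have hp' : ((s.drop k).take (m - k)).getLastD (s.getD (k - 1) ' ') = s.getD (m - 1) ' ' := by
        rcases Nat.eq_or_lt_of_le hkm with hEq | hLt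
        · simp [← hEq]
        · have hj : m - k = (m - k - 1) + 1 := by omega
          rw [hj, List.take_add_one]
          have hg : (s.drop k)[m - k - 1]? = some (s[m - 1]'(by omega)) := by
            rw [List.getElem?_drop, List.getElem?_eq_getElem (by omega)]
            congr 1
            congr 1
            omega
          rw [hg]
          simp only [Option.toList_some, List.getLastD_concat]
          simp [List.getD_eq_getElem?_getD, List.getElem?_eq_getElem (show m - 1 < s.length by omega)]
      have hFS0 : pvFS key (s.getD (k - 1) ' ') (s.drop k) =
          (pvFS key (s.getD (m - 1) ' ') (key :: (s.drop k).drop (m - k + 1))).map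
            (· + (m - k)) := by
        conv_lhs => rw [hd_decomp]
        rw [pvFS_append _ _ hnotin, hp', hlentake]
      have hdropdrop : (s.drop k).drop (m - k + 1) = s.drop (m + 1) := by
        rw [List.drop_drop]
        congr 1
        omega
      by_cases hesc : s.getD (m - 1) ' ' = '\\'
      · -- the found occurrence is escaped: A's inner loop goes round again
        have hcond : r ≠ -1 ∧ PySem.List.pyGet? s (r - 1) = some '\\' := by
          refine ⟨by omega, ?_⟩
          have hcast : r - 1 = ((m - 1 : Nat) : Int) := by omega
          rw [hcast, PySem.List.pyGet?_natCast, List.getElem?_eq_getElem (by omega : m - 1 < s.length)]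
          rw [List.getD_eq_getElem s ' ' (by omega : m - 1 < s.length)] at hesc
          simp [hesc]
        have hstep : pvAScan (f + 1) s key r emb =
            pvAScan f s key (PySem.Chars.findFrom s [key] (r + 1) none) true := by
          simp only [pvAScan, if_pos hcond]
        have hcast1 : r + 1 = ((m + 1 : Nat) : Int) := by omega
        rw [hstep, hcast1, ih s (m + 1) true (by omega) (by omega) (by omega)]
        have hsm : s.getD (m + 1 - 1) ' ' = key := by
          simp only [Nat.add_sub_cancel]
          rw [List.getD_eq_getElem s ' ' hmlt, hsmval]
        rw [hFS0]
        have hfs1 : pvFS key (s.getD (m - 1) ' ') (key :: (s.drop k).drop (m - k + 1)) =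
            (pvFS key key ((s.drop k).drop (m - k + 1))).map (· + 1) := by
          rw [pvFS]
          rw [if_neg (fun hc => hc.2 hesc)]
        rw [hfs1, hdropdrop, hsm]
        rcases hfs2 : pvFS key key (s.drop (m + 1)) with _ | j
        · simp only [Option.map_none]
          simp [hmem]
        · simp only [Option.map_some]
          have hmemtake : key ∈ (s.drop k).take (j + 1 + (m - k)) := by
            rw [List.mem_iff_getElem]
            refine ⟨m - k, by simp [List.length_take]; omega, ?_⟩
            rw [List.getElem_take]
            exact hdj
          simp only [hmemtake, decide_true, Bool.or_true, Bool.true_or, Prod.mk.injEq]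
          exact ⟨by push_cast; omega, trivial⟩
      · -- the found occurrence is not escaped: A's inner loop stops here
        have hcond : ¬(r ≠ -1 ∧ PySem.List.pyGet? s (r - 1) = some '\\') := by
          rintro ⟨-, hp⟩
          have hcast : r - 1 = ((m - 1 : Nat) : Int) := by omega
          rw [hcast, PySem.List.pyGet?_natCast, List.getElem?_eq_getElem (by omega : m - 1 < s.length)] at hp
          apply hesc
          rw [List.getD_eq_getElem s ' ' (by omega : m - 1 < s.length)]
          simpa using hp
        have hstep : pvAScan (f + 1) s key r emb = (r, emb) := by
          simp only [pvAScan, if_neg hcond]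
        rw [hstep, hFS0]
        have hfs1 : pvFS key (s.getD (m - 1) ' ') (key :: (s.drop k).drop (m - k + 1)) =
            some 0 := by
          rw [pvFS, if_pos ⟨rfl, hesc⟩]
        rw [hfs1]
        simp only [Option.map_some, Nat.zero_add, Prod.mk.injEq]
        exact ⟨by push_cast; omega, by simp [hnotin]⟩
    · -- no further occurrence: find returns -1 and the loop exits at once
      have hFF : PySem.Chars.findFrom s [key] (k : Int) none = -1 := by
        rw [PySem.Chars.findFrom_natCast_eq_neg_one_iff s [key] k h2]
        simp [List.singleton_infix_iff, hmem]
      rw [hFF]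
      have hstep : pvAScan (f + 1) s key (-1) emb = (-1, emb) := by
        simp [pvAScan]
      rw [hstep, pvFS_eq_none _ hmem]
      simp [hmem]

-- whitespace bookkeeping: A re-strips both ends each round, B only skips leading
-- whitespace; they agree because the working string never has trailing whitespace.
lemma pv_head?_dropWhile {p : Char → Bool} {l : List Char} {x : Char}
    (h : (l.dropWhile p).head? = some x) : p x = false := by
  induction l with
  | nil => simp at h
  | cons y ys ih =>
    rw [List.dropWhile_cons] at h
    split at h
    · exact ih h
    · simp_all

lemma pv_dropWhile_eq_self {p : Char → Bool} {l : List Char}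
    (h : ∀ x, l.head? = some x → p x = false) : l.dropWhile p = l := by
  cases l with
  | nil => rfl
  | cons y ys => simp [h y rfl]

lemma pvNoTrail_suffix {s t : List Char} (h : t <:+ s) (hs : pvNoTrail s) : pvNoTrail t := by
  obtain ⟨pre, rfl⟩ := h
  intro c hc
  have hne : t ≠ [] := by rintro rfl; simp at hc
  exact hs c (by rw [List.getLast?_append_of_ne_nil pre hne]; exact hc)

lemma pvNoLead_prefix {s t : List Char} (h : t <+: s) (hs : pvNoLead s) : pvNoLead t := by
  obtain ⟨suf, rfl⟩ := h
  intro c hc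
  exact hs c (by rw [List.head?_append_of_ne_nil]; exact hc; rintro rfl; simp at hc)

lemma pvNoTrail_rstrip (s : List Char) : pvNoTrail (PySem.Chars.rstrip s) := by
  intro c hc
  unfold PySem.Chars.rstrip at hc
  rw [List.getLast?_reverse] at hc
  exact pv_head?_dropWhile hc

lemma pvNoLead_lstrip (s : List Char) : pvNoLead (s.dropWhile PySem.Chars.isspace) :=
  fun _ hc => pv_head?_dropWhile hc

lemma pv_rstrip_eq_self {s : List Char} (h : pvNoTrail s) : PySem.Chars.rstrip s = s := by
  unfold PySem.Chars.rstrip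
  rw [pv_dropWhile_eq_self, List.reverse_reverse]
  intro x hx
  exact h x (by rw [← List.head?_reverse]; exact hx)

lemma pv_rstrip_prefix (s : List Char) : PySem.Chars.rstrip s <+: s := by
  unfold PySem.Chars.rstrip
  conv_rhs => rw [← List.reverse_reverse s]
  exact List.reverse_prefix.mpr (List.dropWhile_suffix _)

lemma pv_strip_of_noTrail {s : List Char} (h : pvNoTrail s) :
    PySem.Chars.strip s = s.dropWhile PySem.Chars.isspace := by
  unfold PySem.Chars.strip PySem.Chars.lstrip
  exact pv_rstrip_eq_self (pvNoTrail_suffix (List.dropWhile_suffix _) h)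

lemma pvNoTrail_strip (s : List Char) : pvNoTrail (PySem.Chars.strip s) :=
  pvNoTrail_rstrip _

lemma pv_strip_strip (s : List Char) :
    PySem.Chars.strip (PySem.Chars.strip s) = PySem.Chars.strip s := by
  rw [pv_strip_of_noTrail (pvNoTrail_strip s)]
  apply pv_dropWhile_eq_self
  intro x hx
  apply pvNoLead_prefix (pv_rstrip_prefix _) (pvNoLead_lstrip s) x
  exact hx

lemma pv_length_strip_le (s : List Char) : (PySem.Chars.strip s).length ≤ s.length := by
  unfold PySem.Chars.strip PySem.Chars.rstrip PySem.Chars.lstrip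
  calc (List.dropWhile _ (List.dropWhile _ s).reverse).reverse.length
      ≤ (List.dropWhile PySem.Chars.isspace s).length := by
        rw [List.length_reverse]
        exact le_trans (List.length_dropWhile_le _ _) (by rw [List.length_reverse])
    _ ≤ s.length := List.length_dropWhile_le _ _

lemma pv_takeWhile_not (p : Char → Bool) (l : List Char) :
    l.takeWhile (fun x => !p x) = l.take (l.findIdx p) := by
  induction l with
  | nil => simp
  | cons x xs ih => by_cases h : p x <;> simp [List.findIdx_cons, h, ih]

lemma pv_dropWhile_not (p : Char → Bool) (l : List Char) :
    l.dropWhile (fun x => !p x) = l.drop (l.findIdx p) := by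
  induction l with
  | nil => simp
  | cons x xs ih => by_cases h : p x <;> simp [List.findIdx_cons, h, ih]

lemma pvALoop_nil (f : Nat) (kc : Char) (out : List (List Char)) :
    pvALoop f [] kc out = out := by
  cases f <;> simp [pvALoop, PySem.Chars.strip, PySem.Chars.lstrip, PySem.Chars.rstrip]

lemma pvBLoop_nil (f : Nat) : pvBLoop f [] = [] := by
  cases f <;> simp [pvBLoop]

lemma pvLoop_eq : ∀ (fuel : Nat) (s : List Char) (kc : Char) (out : List (List Char)),
    s.length < fuel → pvNoTrail s →
    pvALoop fuel s kc out = out ++ pvBLoop fuel s := by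
  intro fuel
  induction fuel with
  | zero => intro s kc out h _; omega
  | succ f ih =>
    intro s kc out hlen hNT
    have hstrip : PySem.Chars.strip s = s.dropWhile PySem.Chars.isspace :=
      pv_strip_of_noTrail hNT
    have htlen : (s.dropWhile PySem.Chars.isspace).length ≤ s.length :=
      List.length_dropWhile_le _ _
    have htNT : pvNoTrail (s.dropWhile PySem.Chars.isspace) :=
      pvNoTrail_suffix (List.dropWhile_suffix _) hNT
    simp only [pvALoop, pvBLoop, hstrip]
    rcases ht : s.dropWhile PySem.Chars.isspace with _ | ⟨c, rest⟩
    · simp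
    · have hclen : rest.length + 1 ≤ s.length := by
        have := htlen; rw [ht] at this; simpa using this
      have hcNS : PySem.Chars.isspace c = false :=
        pvNoLead_lstrip s c (by rw [ht]; rfl)
      rw [ht] at htNT
      by_cases hdel : c ∈ ['\'', '"', '`']
      · -- quoted token
        have hspec := pvAScan_spec c ((c :: rest).length + 1) (c :: rest) 1 false
          (le_refl 1) (by simp) (by simp)
        rw [Nat.cast_one] at hspec
        simp only [Nat.sub_self, List.getD_cons_zero, List.drop_one, List.tail_cons,
          Bool.false_or] at hspec
        simp only [if_pos hdel, hspec, pvBScan_spec c rest c]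
        rcases hfs : pvFS c c rest with _ | j
        · -- unterminated quote: token runs to the end of the string
          rw [if_neg (by simp)]
          rw [PySem.List.slice_from_one]
          simp only [List.tail_cons, List.dropLast_concat, pvALoop_nil, pvBLoop_nil]
          by_cases hm : c ∈ rest <;> simp [hm]
        · -- closing quote found at offset j of rest
          rw [if_pos (show ¬((1 + j : Nat) : Int) = -1 by omega)]
          have hsl1 : PySem.List.slice (c :: rest) (some 1) (some ((1 + j : Nat) : Int)) =
              rest.take j := by
            rw [PySem.List.slice_toNat _ (by omega) (by omega)]
            have h1 : (1 : Int).toNat = 1 := rfl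
            have h2 : (((1 + j : Nat) : Int)).toNat = 1 + j := Int.toNat_natCast _
            rw [h1, h2, Nat.add_sub_cancel_left, List.drop_one, List.tail_cons]
          have hsl2 : PySem.List.slice (c :: rest) (some (((1 + j : Nat) : Int) + 1)) none =
              rest.drop (j + 1) := by
            rw [PySem.List.slice_from _ (by omega)]
            have h2 : ((((1 + j : Nat) : Int)) + 1).toNat = (j + 1) + 1 := by omega
            rw [h2, List.drop_succ_cons]
          rw [hsl1, hsl2]
          have hsuf : rest.drop (j + 1) <:+ c :: rest :=
            List.IsSuffix.trans (List.drop_suffix _ _) (List.suffix_cons _ _)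
          rw [ih (rest.drop (j + 1)) c _
            (by have := List.length_drop (l := rest) (i := j + 1); omega)
            (pvNoTrail_suffix hsuf htNT)]
          simp only [List.dropLast_concat]
          by_cases hm : c ∈ rest.take j <;> simp [hm, List.append_assoc]
      · -- unquoted token: up to the next whitespace
        simp only [if_neg hdel]
        rw [PySem.List.slice_to_natCast, PySem.List.slice_from_natCast,
          pv_takeWhile_not, pv_dropWhile_not]
        have hit : (c :: rest).findIdx PySem.Chars.isspace =
            rest.findIdx PySem.Chars.isspace + 1 := by
          simp [List.findIdx_cons, hcNS]
        have hsuf : (c :: rest).drop ((c :: rest).findIdx PySem.Chars.isspace) <:+ c :: rest :=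
          List.drop_suffix _ _
        rw [ih _ kc _
          (by
            have hld := List.length_drop (l := c :: rest)
              (i := (c :: rest).findIdx PySem.Chars.isspace)
            simp only [List.length_cons] at hld
            omega)
          (pvNoTrail_suffix hsuf htNT)]
        simp [List.append_assoc]

theorem pv_main (s : String) : split_up s = split_up_alt s := by
  unfold split_up split_up_alt
  have hfirst : pvALoop (s.toList.length + 1) s.toList ' ' [] =
      pvALoop (s.toList.length + 1) (PySem.Chars.strip s.toList) ' ' [] := by
    simp only [pvALoop, pv_strip_strip]
  rw [hfirst, pvLoop_eq (s.toList.length + 1) (PySem.Chars.strip s.toList) ' ' []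
    (by have := pv_length_strip_le s.toList; omega) (pvNoTrail_strip s.toList)]
  simp

-- ===== VERDICT (by name: the statement is the Claim_ definition above) =====
theorem split_up_spec : Claim_equal_split_up := by
  intro s _
  unfold Spec_split_up
  exact pv_main s
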